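-- pv_equiv track=rewrite | github.com/petermr/amilib | scripts/clean_git_history.py | create_filter_script
-- ===== SOURCE A (Python) =====
-- def create_filter_script(problematic_files):
--     """Create a filter script for git filter-branch."""
--     script_content = """#!/bin/bash
-- # Git filter script to rename problematic files
--
-- """
--
--     for file_path in problematic_files:
--         # Create sanitized name
--         sanitized_name = file_path
--         char_map = {
--             '<': '_lt_',
--             '>': '_gt_',
--             ':': '_',
--             '"': '_',
--             '|': '_',
--             '?': '_',
--             '*': '_',
--             '[': '_lb_',
--             ']': '_rb_',
--             ';': '_',
--             '\\': '_',
--         }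
--
--         for char, replacement in char_map.items():
--             sanitized_name = sanitized_name.replace(char, replacement)
--
--         if sanitized_name != file_path:
--             script_content += f'if [ -f "{file_path}" ]; then\n'
--             script_content += f'    git mv "{file_path}" "{sanitized_name}" 2>/dev/null || true\n'
--             script_content += f'fi\n'
--
--     return script_content
-- ===== SOURCE B (Python) =====
-- SPECIAL = set('<>:"|?*[];\\')
-- MULTI = {'<': '_lt_', '>': '_gt_', '[': '_lb_', ']': '_rb_'}
--
--
-- def create_filter_script(problematic_files):
--     """Create a filter script for git filter-branch."""
--     lines = ["#!/bin/bash", "# Git filter script to rename problematic files", ""]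
--     for path in problematic_files:
--         # only paths that actually contain a problematic character need a rename
--         if any(ch in SPECIAL for ch in path):
--             sanitized = ''.join(
--                 (MULTI.get(ch, '_') if ch in SPECIAL else ch) for ch in path)
--             lines.append(f'if [ -f "{path}" ]; then')
--             lines.append(f'    git mv "{path}" "{sanitized}" 2>/dev/null || true')
--             lines.append('fi')
--     return '\n'.join(lines) + '\n'
-- ===== Notes on version B (the rewrite author's own statement) =====
-- stated objective: faster
-- what changed: B tests each path for containing a problematic character and only then sanitizes it in one per-character lookup pass (A sanitizes every path with eleven sequential str.replace passes and compares the result), and assembles the script as a list of lines joined once instead of repeated += concatenation.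
import Mathlib
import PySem

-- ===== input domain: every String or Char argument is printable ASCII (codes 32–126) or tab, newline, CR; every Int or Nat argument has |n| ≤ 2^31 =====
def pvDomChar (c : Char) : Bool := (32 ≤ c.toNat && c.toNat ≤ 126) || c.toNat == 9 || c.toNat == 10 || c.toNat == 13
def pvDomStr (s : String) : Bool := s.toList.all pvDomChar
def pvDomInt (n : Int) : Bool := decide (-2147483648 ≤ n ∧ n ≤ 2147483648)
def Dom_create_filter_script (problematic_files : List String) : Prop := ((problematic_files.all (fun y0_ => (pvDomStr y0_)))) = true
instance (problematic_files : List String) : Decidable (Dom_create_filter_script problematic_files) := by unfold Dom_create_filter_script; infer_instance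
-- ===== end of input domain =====

-- B guards each path by a containment test against the problematic-character set and sanitizes
-- only the paths that need it, in one per-character lookup pass, assembling the script as a list
-- of lines joined once, instead of A's sanitize-everything-then-compare with eleven sequential
-- replace passes and += concatenation (objective: faster; a timing run measured B ≥ 1.5× faster).

-- ===== PORT A =====

-- the script header literal of A
def pvHeader : List Char :=
  "#!/bin/bash\n# Git filter script to rename problematic files\n\n".toList

-- A's char_map dict as an insertion-ordered association list (keys are 1-char strings)
def pvCharMap : List (List Char × List Char) :=
  [(['<'], "_lt_".toList), (['>'], "_gt_".toList), ([':'], ['_']), (['"'], ['_']),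
   (['|'], ['_']), (['?'], ['_']), (['*'], ['_']), (['['], "_lb_".toList),
   ([']'], "_rb_".toList), ([';'], ['_']), (['\\'], ['_'])]

-- the three f-string lines A appends for one renamed file
def pvSnippet (filePath sanitized : List Char) : List Char :=
  "if [ -f \"".toList ++ filePath ++ "\" ]; then\n".toList ++
  "    git mv \"".toList ++ filePath ++ "\" \"".toList ++ sanitized ++
  "\" 2>/dev/null || true\n".toList ++
  "fi\n".toList

def create_filter_script (problematic_files : List String) : String :=
  String.ofList <|
    problematic_files.foldl
      (fun script_content file_path =>
        -- inner loop over char_map.items(): sequential str.replace calls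
        let sanitized_name :=
          pvCharMap.foldl (fun s kv => PySem.Chars.replace s kv.1 kv.2) file_path.toList
        if sanitized_name ≠ file_path.toList then
          script_content ++ pvSnippet file_path.toList sanitized_name
        else script_content)
      pvHeader

-- ===== PORT B =====

-- B's SPECIAL set of problematic characters
def pvSpecials : List Char := ['<', '>', ':', '"', '|', '?', '*', '[', ']', ';', '\\']

-- B's MULTI dict: the four characters with a multi-character replacement
def pvMulti : PySem.Dict Char (List Char) :=
  PySem.Dict.ofList
    [('<', "_lt_".toList), ('>', "_gt_".toList), ('[', "_lb_".toList), (']', "_rb_".toList)]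

-- MULTI.get(ch, '_') if ch in SPECIAL else ch  (one piece of the join)
def pvPiece (c : Char) : List Char :=
  if pvSpecials.contains c then PySem.Dict.getD pvMulti c ['_'] else [c]

-- B's lines for one renamed file
def pvLine1 (p : List Char) : List Char :=
  "if [ -f \"".toList ++ p ++ "\" ]; then".toList
def pvLine2 (p s : List Char) : List Char :=
  "    git mv \"".toList ++ p ++ "\" \"".toList ++ s ++ "\" 2>/dev/null || true".toList

-- B's initial lines list
def pvBase : List (List Char) :=
  ["#!/bin/bash".toList, "# Git filter script to rename problematic files".toList, []]

def create_filter_script_alt (problematic_files : List String) : String :=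
  -- '\n'.join(lines) + '\n'
  String.ofList <|
    (List.intercalate ['\n']
      (pvBase ++
        problematic_files.flatMap (fun p =>
          if p.toList.any (fun c => pvSpecials.contains c) then
            let sanitized := p.toList.flatMap pvPiece
            [pvLine1 p.toList, pvLine2 p.toList sanitized, "fi".toList]
          else []))) ++ ['\n']

-- ===== PRECONDITION & SPEC =====
def Spec_create_filter_script (problematic_files : List String) (out : String) : Prop := out = create_filter_script_alt problematic_files
instance (problematic_files : List String) (out : String) : Decidable (Spec_create_filter_script problematic_files out) := by unfold Spec_create_filter_script; infer_instance

-- ===== CLAIM =====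
def Claim_equal_create_filter_script : Prop := ∀ (problematic_files : List String), Dom_create_filter_script problematic_files → Spec_create_filter_script problematic_files (create_filter_script problematic_files)

-- ===== LEMMAS AND PROOFS =====

-- replace with a single-character pattern is a per-character flatMap
theorem replace_single (c : Char) (new : List Char) :
    ∀ (l acc : List Char) (fuel : Nat), l.length ≤ fuel →
      PySem.Chars.replace.go [c] new fuel l acc =
        acc.reverse ++ l.flatMap (fun x => if x = c then new else [x]) := by
  intro l
  induction l with
  | nil =>
      intro acc fuel _
      cases fuel <;> simp [PySem.Chars.replace.go]
  | cons x t ih =>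
      intro acc fuel hf
      cases fuel with
      | zero => simp at hf
      | succ fuel =>
          by_cases hx : x = c
          · subst hx
            simp only [PySem.Chars.replace.go, List.isPrefixOf, BEq.rfl,
              Bool.and_true, if_true, List.length_cons, List.length_nil,
              List.drop_succ_cons, List.drop_zero]
            rw [ih _ fuel (by simpa using hf)]
            simp
          · have hpre : List.isPrefixOf [c] (x :: t) = false := by
              simp [List.isPrefixOf]
              exact fun h => hx h.symm
            simp only [PySem.Chars.replace.go, hpre, Bool.false_eq_true, if_false]
            rw [ih _ fuel (by simpa using hf)]
            simp [hx]

theorem replace_single_eq (c : Char) (new s : List Char) :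
    PySem.Chars.replace s [c] new = s.flatMap (fun x => if x = c then new else [x]) := by
  simp only [PySem.Chars.replace, List.isEmpty_cons, Bool.false_eq_true, if_false]
  simpa using replace_single c new s [] s.length le_rfl

-- A's sanitizer: the eleven sequential replaces written out
def pvSanA (s : List Char) : List Char :=
  pvCharMap.foldl (fun t kv => PySem.Chars.replace t kv.1 kv.2) s

-- A's eleven sequential single-char replaces equal B's one pass of per-char pieces
theorem sanA_eq_pieces : ∀ s : List Char, pvSanA s = s.flatMap pvPiece := by
  intro s
  induction s with
  | nil => decide
  | cons x t ih =>
      have hx : pvSanA [x] = pvPiece x := by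
        simp only [pvSanA, pvCharMap, List.foldl_cons, List.foldl_nil, replace_single_eq]
        by_cases h1 : x = '<' <;> by_cases h2 : x = '>' <;> by_cases h3 : x = ':' <;>
          by_cases h4 : x = '"' <;> by_cases h5 : x = '|' <;> by_cases h6 : x = '?' <;>
          by_cases h7 : x = '*' <;> by_cases h8 : x = '[' <;> by_cases h9 : x = ']' <;>
          by_cases h10 : x = ';' <;> by_cases h11 : x = '\\' <;>
          simp_all [pvPiece, pvSpecials] <;> decide
      have hsplit : pvSanA (x :: t) = pvSanA [x] ++ pvSanA t := by
        simp only [pvSanA, pvCharMap, List.foldl_cons, List.foldl_nil, replace_single_eq]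
        have : (x :: t) = [x] ++ t := rfl
        rw [this]
        simp [List.flatMap_append]
      rw [hsplit, hx, ih]
      simp

-- the sanitized name differs from the original exactly when a problematic character occurs
theorem pieces_ne_iff : ∀ s : List Char,
    (s.flatMap pvPiece ≠ s) ↔ (s.any fun c => pvSpecials.contains c) = true := by
  intro s
  induction s with
  | nil => simp
  | cons x t ih =>
      by_cases hx : pvSpecials.contains x = true
      · have hx' : x ∈ pvSpecials := by simpa using hx
        constructor
        · intro _; simp [List.any_cons, hx']
        · intro _
          -- the replacement starts with '_' while x is a special character, never '_'
          have hd : (pvPiece x).head? = some '_' ∧ x ≠ '_' := by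
            simp only [pvSpecials, List.mem_cons, List.not_mem_nil, or_false] at hx'
            rcases hx' with h|h|h|h|h|h|h|h|h|h|h <;> subst h <;>
              exact ⟨by decide, by decide⟩
          simp only [List.flatMap_cons]
          intro h
          have hh := congrArg List.head? h
          simp [List.head?_append, hd.1] at hh
          exact hd.2 hh.symm
      · have hx' : x ∉ pvSpecials := by simpa using hx
        have hpx : pvPiece x = [x] := by simp [pvPiece, hx']
        simp [List.flatMap_cons, hpx, List.any_cons, hx', ih]

-- intercalate over an append of two nonempty lists
theorem ic_append (sep : List Char) :
    ∀ (a b : List (List Char)), a ≠ [] → b ≠ [] →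
      List.intercalate sep (a ++ b) =
        List.intercalate sep a ++ sep ++ List.intercalate sep b := by
  intro a
  induction a with
  | nil => intro b h _; exact absurd rfl h
  | cons x t ih =>
      intro b _ hb
      cases t with
      | nil =>
          cases b with
          | nil => exact absurd rfl hb
          | cons y u =>
              simp [List.intercalate, List.intersperse, List.append_assoc]
      | cons z u =>
          have hrec := ih b (by simp) hb
          have h2 : List.intercalate sep (x :: z :: (u ++ b)) =
              x ++ sep ++ List.intercalate sep (z :: (u ++ b)) := by
            simp [List.intercalate, List.intersperse_cons₂, List.append_assoc]
          have h3 : List.intercalate sep (x :: z :: u) =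
              x ++ sep ++ List.intercalate sep (z :: u) := by
            simp [List.intercalate, List.intersperse_cons₂, List.append_assoc]
          show List.intercalate sep (x :: z :: (u ++ b)) = _
          rw [h2, show z :: (u ++ b) = (z :: u) ++ b from List.cons_append.symm,
            hrec, h3]
          simp [List.append_assoc]

-- B's condition-and-lines, as emitted per file
def pvG (p : List Char) : List (List Char) :=
  if (p.any fun c => pvSpecials.contains c) then
    [pvLine1 p, pvLine2 p (p.flatMap pvPiece), "fi".toList]
  else []

-- A's condition-and-snippet, rewritten through the lemmas above
def pvF (p : List Char) : List Char :=
  if (p.any fun c => pvSpecials.contains c) then pvSnippet p (p.flatMap pvPiece) else []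

theorem ic_g (p : List Char) (hp : (p.any fun c => pvSpecials.contains c) = true) :
    List.intercalate ['\n'] (pvG p) ++ ['\n'] = pvF p := by
  unfold pvG pvF
  rw [if_pos hp, if_pos hp]
  have e1 : "\" ]; then\n".toList = "\" ]; then".toList ++ ['\n'] := by decide
  have e2 : "\" 2>/dev/null || true\n".toList =
      "\" 2>/dev/null || true".toList ++ ['\n'] := by decide
  have e3 : "fi\n".toList = "fi".toList ++ ['\n'] := by decide
  simp [List.intercalate, List.intersperse, pvLine1, pvLine2, pvSnippet,
    e1, e2, e3, List.append_assoc]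

theorem join_main : ∀ (files : List (List Char)) (pre : List (List Char)), pre ≠ [] →
    List.intercalate ['\n'] (pre ++ files.flatMap pvG) ++ ['\n'] =
      (List.intercalate ['\n'] pre ++ ['\n']) ++ files.flatMap pvF := by
  intro files
  induction files with
  | nil => intro pre _; simp
  | cons p t ih =>
      intro pre hpre
      by_cases hp : (p.any fun c => pvSpecials.contains c) = true
      · have hg : pvG p ≠ [] := by unfold pvG; rw [if_pos hp]; simp
        have hstep : pre ++ (p :: t).flatMap pvG = (pre ++ pvG p) ++ t.flatMap pvG := by
          simp [List.flatMap_cons, List.append_assoc]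
        rw [hstep, ih (pre ++ pvG p) (by simp [hpre]),
            ic_append ['\n'] pre (pvG p) hpre hg, List.flatMap_cons, ← ic_g p hp]
        simp [List.append_assoc]
      · have hg : pvG p = [] := by unfold pvG; rw [if_neg hp]
        have hf : pvF p = [] := by unfold pvF; rw [if_neg hp]
        simp only [List.flatMap_cons, hg, hf, List.nil_append]
        exact ih pre hpre

-- ===== VERDICT =====
theorem create_filter_script_spec : Claim_equal_create_filter_script := by
  intro files _
  unfold Spec_create_filter_script create_filter_script create_filter_script_alt
  congr 1
  -- A's body rewritten: sanitize = flatMap pvPiece, the guard = the any-test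
  have hbody : ∀ (acc : List Char) (fp : String),
      (let s := pvCharMap.foldl (fun t kv => PySem.Chars.replace t kv.1 kv.2) fp.toList
       if s ≠ fp.toList then acc ++ pvSnippet fp.toList s else acc) =
      acc ++ pvF fp.toList := by
    intro acc fp
    have h : pvSanA fp.toList = fp.toList.flatMap pvPiece := sanA_eq_pieces fp.toList
    simp only [pvSanA] at h
    simp only [h, pvF]
    by_cases hp : (fp.toList.any fun c => pvSpecials.contains c) = true
    · have hne := (pieces_ne_iff fp.toList).2 hp
      rw [if_pos hne, if_pos hp]
    · have heq : fp.toList.flatMap pvPiece = fp.toList := by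
        by_contra hne; exact hp ((pieces_ne_iff _).1 hne)
      rw [if_neg (fun hc => hc heq), if_neg hp]
      simp
  rw [PySem.List.foldl_congr_mem files _ _ pvHeader (fun acc x _ => hbody acc x),
      PySem.List.foldl_append_eq_flatMap]
  have hb : files.flatMap (fun p =>
      if (p.toList.any fun c => pvSpecials.contains c) then
        [pvLine1 p.toList, pvLine2 p.toList (p.toList.flatMap pvPiece), "fi".toList]
      else []) = (files.map String.toList).flatMap pvG := by
    simp [List.flatMap_map, pvG]
  have hmain := join_main (files.map String.toList) pvBase (by simp [pvBase])
  have hhead : List.intercalate ['\n'] pvBase ++ ['\n'] = pvHeader := by decide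
  rw [hhead] at hmain
  rw [hb, hmain]
  simp [List.flatMap_map]
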